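-- pv_equiv track=rewrite | github.com/mattbellis/electron_decay_and_PEPV | scripts/slice_tools.py | create_slices
-- ===== SOURCE A (Python) =====
-- def create_slices(Data, numSlices=10):
--     tot = len(Data)
--     interval = tot/numSlices
--     Slices = []
--
--     for s in range(0,numSlices):
--         temp = []
--         for i in range(0,tot):
--             if(i%numSlices == s):
--                 temp.append(Data[i])
--         Slices.append(temp)
--     return Slices
-- ===== SOURCE B (Python) =====
-- def create_slices(Data, numSlices=10):
--     return [Data[s::numSlices] for s in range(numSlices)]
-- ===== Notes on version B (the rewrite author's own statement) =====
-- stated objective: faster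
-- what changed: B extracts each bucket with one extended slice Data[s::numSlices] instead of scanning every index of Data with a modulo test for every bucket, removing the repeated full scans.
import Mathlib
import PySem

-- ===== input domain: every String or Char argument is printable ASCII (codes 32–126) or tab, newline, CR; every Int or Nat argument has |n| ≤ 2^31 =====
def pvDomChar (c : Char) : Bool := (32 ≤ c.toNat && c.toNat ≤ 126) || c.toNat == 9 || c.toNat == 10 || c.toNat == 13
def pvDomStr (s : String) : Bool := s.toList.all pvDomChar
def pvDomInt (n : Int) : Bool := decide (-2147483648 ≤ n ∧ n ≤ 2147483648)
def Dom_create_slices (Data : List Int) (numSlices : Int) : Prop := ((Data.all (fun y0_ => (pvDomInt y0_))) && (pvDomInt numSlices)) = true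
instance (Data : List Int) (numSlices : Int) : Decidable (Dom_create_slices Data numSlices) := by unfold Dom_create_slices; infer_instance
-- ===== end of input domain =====

-- B extracts each bucket with one extended slice Data[s::numSlices] instead of A's
-- per-bucket full scan with a modulo test (objective: faster).

-- ===== PORT A =====
-- A: tot = len(Data); interval = tot/numSlices (raises ZeroDivisionError iff numSlices = 0,
-- excluded by Pre_; its value is otherwise unused); then for s in range(numSlices) collect
-- Data[i] for i in range(tot) with i % numSlices == s.  Data[i] has 0 ≤ i < tot,
-- so pyGetD with default 0 is exact.
def create_slices (Data : List Int) (numSlices : Int) : List (List Int) :=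
  let tot : Int := Data.length
  (PySem.List.pyRange 0 numSlices 1).foldl
    (fun Slices s =>
      Slices ++ [(PySem.List.pyRange 0 tot 1).foldl
        (fun temp i =>
          if PySem.Int.mod i numSlices == s then temp ++ [PySem.List.pyGetD Data i 0] else temp)
        []])
    []

-- ===== PORT B =====
-- B: [Data[s::numSlices] for s in range(numSlices)]; the extended slice is exactly
-- PySem.List.slice?, which is none only for step 0 — unreachable here since the range
-- is empty then, so getD [] never supplies its default.
def create_slices_alt (Data : List Int) (numSlices : Int) : List (List Int) :=
  (PySem.List.pyRange 0 numSlices 1).map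
    (fun s => (PySem.List.slice? Data (some s) none numSlices).getD [])

-- ===== PRECONDITION & SPEC =====
-- A raises ZeroDivisionError at 'interval = tot/numSlices' iff numSlices = 0; only that is excluded.
def Pre_create_slices (Data : List Int) (numSlices : Int) : Prop := numSlices ≠ 0
instance (Data : List Int) (numSlices : Int) : Decidable (Pre_create_slices Data numSlices) := by
  unfold Pre_create_slices; infer_instance

def pvWitness_create_slices : List Int × Int := ([5, -3, 7, 0, 2], 2)

def Spec_create_slices (Data : List Int) (numSlices : Int) (out : List (List Int)) : Prop :=
  out = create_slices_alt Data numSlices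
instance (Data : List Int) (numSlices : Int) (out : List (List Int)) : Decidable (Spec_create_slices Data numSlices out) := by
  unfold Spec_create_slices; infer_instance

-- ===== CLAIM (what is proved, stated in full; the proofs are below) =====
def Claim_equal_create_slices : Prop := ∀ (Data : List Int) (numSlices : Int), Dom_create_slices Data numSlices → Pre_create_slices Data numSlices → Spec_create_slices Data numSlices (create_slices Data numSlices)

-- ===== LEMMAS AND PROOFS =====

-- A strided pyRange with positive step is strictly increasing.
theorem pyRange_pairwise_lt (a b : Int) {st : Int} (h : 0 < st) :
    (PySem.List.pyRange a b st).Pairwise (· < ·) := by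
  rw [PySem.List.pyRange_of_pos a b h]
  refine List.Pairwise.map _ ?_ List.pairwise_lt_range
  intro i j hij
  have hij' : (i : Int) < (j : Int) := by exact_mod_cast hij
  have := mul_lt_mul_of_pos_left hij' h
  linarith

-- The indices 0 ≤ i < tot with i % n = s are exactly the strided range s, s+n, …  (0 ≤ s < n).
theorem filter_mod_eq_pyRange (tot s n : Int) (hs0 : 0 ≤ s) (hsn : s < n) :
    (PySem.List.pyRange 0 tot 1).filter (fun i => PySem.Int.mod i n == s)
      = PySem.List.pyRange s tot n := by
  have hn : 0 < n := lt_of_le_of_lt hs0 hsn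
  have hL : ((PySem.List.pyRange 0 tot 1).filter
      (fun i => PySem.Int.mod i n == s)).Pairwise (· < ·) :=
    List.Pairwise.sublist List.filter_sublist (pyRange_pairwise_lt 0 tot one_pos)
  have hR : (PySem.List.pyRange s tot n).Pairwise (· < ·) := pyRange_pairwise_lt s tot hn
  have hmem : ∀ x : Int,
      (x ∈ (PySem.List.pyRange 0 tot 1).filter (fun i => PySem.Int.mod i n == s)) ↔
        x ∈ PySem.List.pyRange s tot n := by
    intro x
    simp only [List.mem_filter, PySem.List.mem_pyRange_iff_of_pos one_pos,
      PySem.List.mem_pyRange_iff_of_pos hn, beq_iff_eq, sub_zero,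
      PySem.Int.mod_eq_emod_of_pos hn]
    constructor
    · rintro ⟨⟨hx0, hxt, -⟩, hmod⟩
      refine ⟨?_, hxt, ⟨x / n, by rw [← hmod, Int.emod_def]; ring⟩⟩
      by_cases hxn : x < n
      · have : x % n = x := Int.emod_eq_of_lt hx0 hxn
        omega
      · omega
    · rintro ⟨hsx, hxt, ⟨k, hk⟩⟩
      have h0 : (x - s) % n = 0 := by rw [hk]; exact Int.mul_emod_right n k
      have : x % n = s % n := Int.emod_eq_emod_iff_emod_sub_eq_zero.mpr h0
      have hss : s % n = s := Int.emod_eq_of_lt hs0 hsn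
      exact ⟨⟨by omega, hxt, one_dvd _⟩, by omega⟩
  have hperm := (List.perm_ext_iff_of_nodup
    (hL.imp fun h => ne_of_lt h) (hR.imp fun h => ne_of_lt h)).mpr hmem
  exact List.Perm.eq_of_pairwise (fun a b _ _ h1 h2 => absurd h2 (lt_asymm h1)) hL hR hperm

-- filterMap collapses to map when the function is everywhere some.
theorem filterMap_eq_map_of {α β : Type} (f : α → Option β) (g : α → β) (l : List α)
    (h : ∀ x ∈ l, f x = some (g x)) : l.filterMap f = l.map g := by
  induction l with
  | nil => rfl
  | cons a t ih =>
      simp [h a (by simp), ih (fun x hx => h x (by simp [hx]))]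

-- Python's extended slice xs[s::n] (0 ≤ s, 0 < n) is the strided-index gather.
theorem slice_step_eq (xs : List Int) (s n : Int) (hs : 0 ≤ s) (hn : 0 < n) :
    (PySem.List.slice? xs (some s) none n).getD []
      = (PySem.List.pyRange s (xs.length : Int) n).map (fun i => PySem.List.pyGetD xs i 0) := by
  have hn0 : n ≠ 0 := ne_of_gt hn
  rw [PySem.List.pyRange_of_pos s _ hn]
  simp only [PySem.List.slice?, PySem.List.sliceIndices, if_neg hn0,
    if_neg (not_lt_of_ge (le_of_lt hn)), if_neg (not_lt_of_ge hs), if_pos hn, Option.getD_some]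
  by_cases hsl : s < (xs.length : Int)
  · have hmin : min s (xs.length : Int) = s := min_eq_left (le_of_lt hsl)
    rw [hmin, if_pos hsl, List.map_map]
    refine filterMap_eq_map_of _ _ _ ?_
    intro k hk
    have hk' : k < (((xs.length : Int) - s + n - 1) / n).toNat := List.mem_range.mp hk
    set q : Int := ((xs.length : Int) - s + n - 1) / n with hq
    have hkq : (k : Int) < q := Int.lt_toNat.mp hk'
    have hadd := Int.mul_ediv_add_emod ((xs.length : Int) - s + n - 1) n
    have hr0 : 0 ≤ ((xs.length : Int) - s + n - 1) % n := Int.emod_nonneg _ hn0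
    have hmul : n * ((k : Int) + 1) ≤ n * q :=
      mul_le_mul_of_nonneg_left (Int.add_one_le_of_lt hkq) (le_of_lt hn)
    have hlt : s + n * (k : Int) < (xs.length : Int) := by
      rw [← hq] at hadd; nlinarith
    have hnn : 0 ≤ s + n * (k : Int) := by positivity
    have hmN : (s + n * (k : Int)).toNat < xs.length := by omega
    have hcast : s + n * (k : Int) = (((s + n * (k : Int)).toNat : Nat) : Int) :=
      (Int.toNat_of_nonneg hnn).symm
    simp only [Function.comp]
    rw [hcast, PySem.List.pyGetD_natCast]
    simp [max_eq_left hnn, List.getElem?_eq_getElem hmN, List.getD]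
  · have hmin : min s (xs.length : Int) = (xs.length : Int) := min_eq_right (le_of_not_gt hsl)
    rw [hmin, if_neg (lt_irrefl _), if_neg hsl]
    simp

-- ===== VERDICT (by name: the statement is the Claim_ definition above) =====
theorem create_slices_spec : Claim_equal_create_slices := by
  intro Data n _ _
  simp only [Spec_create_slices, create_slices, create_slices_alt]
  rw [PySem.List.foldl_append_singleton_eq_map]
  simp only [List.nil_append]
  refine List.map_congr_left ?_
  intro s hs
  obtain ⟨hs0, hsn, -⟩ := (PySem.List.mem_pyRange_iff_of_pos one_pos s).1 hs
  rw [PySem.List.foldl_append_if]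
  rw [filter_mod_eq_pyRange _ s n hs0 (by omega)]
  rw [slice_step_eq Data s n hs0 (by omega)]
  simp
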